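-- pv_equiv track=rewrite | github.com/SProtector04/SCAVI | backend/anpr/services/ocr_reader.py | _extract_best_plate_candidate
-- ===== SOURCE A (Python) =====
-- def _extract_best_plate_candidate(tokens: list) -> str:
--     """
--     Extract the best license plate candidate from OCR tokens.
--
--     Task 1.3: From all extracted tokens, find the one that most likely
--     represents a license plate (alphanumeric, reasonable length).
--
--     Args:
--         tokens: List of raw text tokens from OCR
--
--     Returns:
--         Best plate candidate or empty string
--     """
--     if not tokens:
--         return ""
--
--     # Filter tokens: keep only alphanumeric ones (remove pure symbols)
--     alphanumeric_tokens = [''.join(c for c in t if c.isalnum()) for t in tokens]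
--     alphanumeric_tokens = [t for t in alphanumeric_tokens if t]  # Remove empty
--
--     if not alphanumeric_tokens:
--         return ""
--
--     # Find longest alphanumeric token (license plates tend to be longer than random text)
--     # Also filter to reasonable plate length (4-10 characters typical)
--     valid_candidates = [t for t in alphanumeric_tokens if 4 <= len(t) <= 10]
--
--     if valid_candidates:
--         # Return the longest valid candidate
--         return max(valid_candidates, key=len)
--
--     # Fallback: return longest alphanumeric token regardless of length
--     return max(alphanumeric_tokens, key=len)
-- ===== SOURCE B (Python) =====
-- def _extract_best_plate_candidate(tokens: list) -> str:
--     # Rank-and-pick: stably sort cleaned tokens by (invalid-length?, -length)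
--     # and take the head; Python's stable sort makes the first longest win,
--     # exactly like max(key=len), with valid-length (4..10) tokens ranked first.
--     cleaned = []
--     for t in tokens:
--         c = ''.join(ch for ch in t if ch.isalnum())
--         if c:
--             cleaned.append(c)
--     ranked = sorted(cleaned, key=lambda c: (0 if 4 <= len(c) <= 10 else 1, -len(c)))
--     return ranked[0] if ranked else ""
-- ===== Notes on version B (the rewrite author's own statement) =====
-- stated objective: alternative
-- what changed: Replaces A's staged filtering plus two max(key=len) scans with a rank-and-pick algorithm: one stable sort of the cleaned tokens by the tuple key (validity-rank, -length) and returning the head.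
import Mathlib
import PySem

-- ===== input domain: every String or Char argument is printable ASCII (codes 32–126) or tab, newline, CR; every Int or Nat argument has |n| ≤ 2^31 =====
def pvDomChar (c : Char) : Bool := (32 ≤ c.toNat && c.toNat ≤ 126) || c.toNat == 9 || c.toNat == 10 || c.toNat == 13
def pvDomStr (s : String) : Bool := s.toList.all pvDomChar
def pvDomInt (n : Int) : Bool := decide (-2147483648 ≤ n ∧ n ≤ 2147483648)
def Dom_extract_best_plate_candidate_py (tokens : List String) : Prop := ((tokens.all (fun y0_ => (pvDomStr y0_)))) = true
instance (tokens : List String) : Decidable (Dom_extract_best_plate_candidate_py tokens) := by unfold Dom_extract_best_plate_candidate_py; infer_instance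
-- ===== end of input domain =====

-- B replaces A's staged maxima with a rank-and-pick: one stable sort of the cleaned
-- tokens by the tuple key (validity-rank, -length) and taking the head (alternative).

-- ===== PORT A =====
-- ''.join(c for c in t if c.isalnum()) : join of singletons = filter (exact on the ASCII domain)
def pvClean (t : String) : String := String.mk (t.toList.filter (fun c => PySem.Chars.isalnum c))

def extract_best_plate_candidate_py (tokens : List String) : String :=
  if tokens == [] then "" else
  let alnum0 := tokens.map (fun t => pvClean t)
  let alnum := alnum0.filter (fun t => !(t == ""))
  if alnum == [] then "" else
  let valid := alnum.filter (fun t => decide (4 ≤ PySem.Str.len t ∧ PySem.Str.len t ≤ 10))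
  if !(valid == []) then
    match PySem.List.max? valid (fun t => PySem.Str.len t) with
    | some m => m
    | none => ""        -- unreachable: valid ≠ [] here
  else
    match PySem.List.max? alnum (fun t => PySem.Str.len t) with
    | some m => m
    | none => ""        -- unreachable: alnum ≠ [] here

-- ===== PORT B =====
-- the two components of B's sort key: lambda c: (0 if 4 <= len(c) <= 10 else 1, -len(c))
def pvK1 (c : String) : Int := if 4 ≤ PySem.Str.len c ∧ PySem.Str.len c ≤ 10 then 0 else 1
def pvK2 (c : String) : Int := -(PySem.Str.len c)

def extract_best_plate_candidate_py_alt (tokens : List String) : String :=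
  let cleaned := tokens.foldl (fun acc t =>
    let c := pvClean t
    if !(c == "") then acc ++ [c] else acc) []
  let ranked := PySem.List.sorted2 cleaned pvK1 pvK2
  match ranked with
  | m :: _ => m
  | [] => ""

-- ===== PRECONDITION & SPEC =====
def Spec_extract_best_plate_candidate_py (tokens : List String) (out : String) : Prop := out = extract_best_plate_candidate_py_alt tokens
instance (tokens : List String) (out : String) : Decidable (Spec_extract_best_plate_candidate_py tokens out) := by unfold Spec_extract_best_plate_candidate_py; infer_instance

-- ===== CLAIM (what is proved, stated in full; the proofs are below) =====
def Claim_equal_extract_best_plate_candidate_py : Prop := ∀ (tokens : List String), Dom_extract_best_plate_candidate_py tokens → Spec_extract_best_plate_candidate_py tokens (extract_best_plate_candidate_py tokens)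

-- ===== LEMMAS AND PROOFS =====

-- the cleaned, nonempty tokens A collects
def pvCleanList (ts : List String) : List String :=
  (ts.map (fun t => pvClean t)).filter (fun t => !(t == ""))

def pvOK (t : String) : Bool := decide (4 ≤ PySem.Str.len t ∧ PySem.Str.len t ≤ 10)

-- B's strict lexicographic comparison (sorted2's internal `lt` for keys pvK1, pvK2)
def pvLt (a b : String) : Bool :=
  decide (pvK1 a < pvK1 b) || (!decide (pvK1 b < pvK1 a) && decide (pvK2 a < pvK2 b))

-- step of the "first minimum under pvLt" fold (what the head of the stable sort computes)
def pvMinStep (m : Option String) (x : String) : Option String :=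
  match m with
  | none => some x
  | some h => if pvLt x h then some x else some h

-- step of A's max(key=len) fold
def pvMaxStep (m : Option String) (x : String) : Option String :=
  match m with
  | none => some x
  | some h => if PySem.Str.len h < PySem.Str.len x then some x else some h

theorem head?_insertBy (bf : String → String → Bool) (x : String) (l : List String) :
    (PySem.List.insertBy bf x l).head? =
      (match l with | [] => some x | y :: _ => if bf x y then some x else some y) := by
  cases l with
  | nil => rfl
  | cons y ys => simp only [PySem.List.insertBy]; split_ifs <;> rfl

theorem head?_foldl_insertBy (bf : String → String → Bool) (xs acc : List String) :
    (xs.foldl (fun a x => PySem.List.insertBy bf x a) acc).head? =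
      xs.foldl (fun m x =>
        match m with
        | none => some x
        | some h => if bf x h then some x else some h) acc.head? := by
  induction xs generalizing acc with
  | nil => rfl
  | cons x xs ih =>
      simp only [List.foldl_cons]
      rw [ih, head?_insertBy]
      cases acc <;> rfl

theorem pvK1_of_ok {c : String} (h : pvOK c = true) : pvK1 c = 0 := by
  unfold pvK1; rw [if_pos (of_decide_eq_true h)]

theorem pvK1_of_not_ok {c : String} (h : pvOK c = false) : pvK1 c = 1 := by
  unfold pvK1; rw [if_neg (of_decide_eq_false h)]

theorem pvLt_valid_valid {a b : String} (ha : pvOK a = true) (hb : pvOK b = true) :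
    pvLt a b = decide (PySem.Str.len b < PySem.Str.len a) := by
  unfold pvLt; rw [pvK1_of_ok ha, pvK1_of_ok hb]; simp [pvK2]

theorem pvLt_valid_invalid {a b : String} (ha : pvOK a = true) (hb : pvOK b = false) :
    pvLt a b = true := by
  unfold pvLt; rw [pvK1_of_ok ha, pvK1_of_not_ok hb]; simp

theorem pvLt_invalid_valid {a b : String} (ha : pvOK a = false) (hb : pvOK b = true) :
    pvLt a b = false := by
  unfold pvLt; rw [pvK1_of_not_ok ha, pvK1_of_ok hb]; simp

theorem pvLt_invalid_invalid {a b : String} (ha : pvOK a = false) (hb : pvOK b = false) :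
    pvLt a b = decide (PySem.Str.len b < PySem.Str.len a) := by
  unfold pvLt; rw [pvK1_of_not_ok ha, pvK1_of_not_ok hb]; simp [pvK2]

-- when both the running best and the new token have the same validity status,
-- the lexicographic-min step is exactly the max-by-length step
theorem pvMinStep_eq_max_of_ok {m x : String} (hm : pvOK m = true) (hx : pvOK x = true) :
    pvMinStep (some m) x = pvMaxStep (some m) x := by
  simp only [pvMinStep, pvMaxStep, pvLt_valid_valid hx hm, decide_eq_true_eq]

theorem pvMinStep_eq_max_of_not_ok {m x : String} (hm : pvOK m = false) (hx : pvOK x = false) :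
    pvMinStep (some m) x = pvMaxStep (some m) x := by
  simp only [pvMinStep, pvMaxStep, pvLt_invalid_invalid hx hm, decide_eq_true_eq]

theorem pvMinStep_take {m x : String} (hm : pvOK m = false) (hx : pvOK x = true) :
    pvMinStep (some m) x = some x := by
  simp only [pvMinStep, pvLt_valid_invalid hx hm]
  simp

theorem pvMinStep_keep {m x : String} (hm : pvOK m = true) (hx : pvOK x = false) :
    pvMinStep (some m) x = some m := by
  simp only [pvMinStep, pvLt_invalid_valid hx hm]
  simp

-- once the running best is a valid-length token, invalid tokens are ignored and
-- valid ones compete on length alone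
theorem minFold_of_valid (L : List String) (m : String) (hm : pvOK m = true) :
    L.foldl pvMinStep (some m) = (L.filter pvOK).foldl pvMaxStep (some m) := by
  induction L generalizing m with
  | nil => rfl
  | cons x L ih =>
      by_cases hx : pvOK x = true
      · rw [List.foldl_cons, List.filter_cons, if_pos hx, List.foldl_cons,
          pvMinStep_eq_max_of_ok hm hx]
        by_cases hlt : PySem.Str.len m < PySem.Str.len x
        · simp only [pvMaxStep, if_pos hlt]; exact ih x hx
        · simp only [pvMaxStep, if_neg hlt]; exact ih m hm
      · have hx' : pvOK x = false := by simpa using hx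
        rw [List.foldl_cons, List.filter_cons, if_neg (by simp [hx']),
          pvMinStep_keep hm hx']
        exact ih m hm

-- with an invalid running best, the first valid token takes over; otherwise
-- invalid tokens compete on length alone
theorem minFold_of_invalid (L : List String) (m : String) (hm : pvOK m = false) :
    L.foldl pvMinStep (some m) =
      (if L.filter pvOK = [] then L.foldl pvMaxStep (some m)
       else (L.filter pvOK).foldl pvMaxStep none) := by
  induction L generalizing m with
  | nil => rfl
  | cons y L ih =>
      by_cases hy : pvOK y = true
      · rw [List.filter_cons, if_pos hy, if_neg (by simp), List.foldl_cons,
          pvMinStep_take hm hy, List.foldl_cons]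
        exact minFold_of_valid L y hy
      · have hy' : pvOK y = false := by simpa using hy
        have hfe : (y :: L).filter pvOK = L.filter pvOK := by
          rw [List.filter_cons, if_neg (by simp [hy'])]
        rw [hfe, List.foldl_cons, List.foldl_cons, pvMinStep_eq_max_of_not_ok hm hy']
        by_cases hlt : PySem.Str.len m < PySem.Str.len y
        · simp only [pvMaxStep, if_pos hlt]; exact ih y hy'
        · simp only [pvMaxStep, if_neg hlt]; exact ih m hm

-- the first lexicographic minimum over the cleaned list is A's staged maximum
theorem minFold_spec (L : List String) :
    L.foldl pvMinStep none =
      (if L.filter pvOK = [] then L.foldl pvMaxStep none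
       else (L.filter pvOK).foldl pvMaxStep none) := by
  cases L with
  | nil => rfl
  | cons x L =>
      by_cases hx : pvOK x = true
      · rw [List.filter_cons, if_pos hx, if_neg (by simp), List.foldl_cons, List.foldl_cons]
        exact minFold_of_valid L x hx
      · have hx' : pvOK x = false := by simpa using hx
        have hfe : (x :: L).filter pvOK = L.filter pvOK := by
          rw [List.filter_cons, if_neg (by simp [hx'])]
        rw [hfe, List.foldl_cons, List.foldl_cons]
        exact minFold_of_invalid L x hx'

-- A's max(key=len) IS the pvMaxStep fold
theorem max?_eq_foldl_maxStep (L : List String) :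
    PySem.List.max? L (fun t => PySem.Str.len t) = L.foldl pvMaxStep none := by
  unfold PySem.List.max?
  congr 1
  funext acc x
  cases acc <;> rfl

-- ===== VERDICT (by name: the statement is the Claim_ definition above) =====
theorem extract_best_plate_candidate_py_spec : Claim_equal_extract_best_plate_candidate_py := by
  intro tokens _
  unfold Spec_extract_best_plate_candidate_py
  simp only [extract_best_plate_candidate_py, extract_best_plate_candidate_py_alt]
  -- B's accumulation loop builds exactly A's cleaned list
  have hloop : tokens.foldl (fun acc t =>
      let c := pvClean t
      if !(c == "") then acc ++ [c] else acc) [] = pvCleanList tokens := by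
    rw [show (tokens.foldl (fun acc t =>
        let c := pvClean t
        if !(c == "") then acc ++ [c] else acc) []) =
        tokens.foldl (fun acc t =>
          if (fun t => !(pvClean t == "")) t then acc ++ [pvClean t] else acc) [] from rfl]
    rw [PySem.List.foldl_append_if (fun t => !(pvClean t == "")) (fun t => pvClean t)]
    simp only [List.nil_append, pvCleanList]
    rw [List.filter_map]
    rfl
  rw [hloop]
  -- head of the stable sort = first lexicographic minimum under (pvK1, pvK2)
  have hsort : ∀ (L : List String),
      (PySem.List.sorted2 L pvK1 pvK2).head? = L.foldl pvMinStep none := by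
    intro L
    show (L.foldl (fun acc x => PySem.List.insertBy _ x acc) []).head? = _
    rw [head?_foldl_insertBy]
    rfl
  by_cases h0 : tokens = []
  · subst h0; simp [pvCleanList, PySem.List.sorted2]
  · rw [if_neg (by simp [h0])]
    rw [show List.filter (fun t => !(t == "")) (List.map (fun t => pvClean t) tokens) = pvCleanList tokens from rfl]
    by_cases h1 : pvCleanList tokens = []
    · rw [if_pos (by simp [h1]), h1]; rfl
    · rw [if_neg (by simp [h1])]
      rw [show List.filter (fun t => decide (4 ≤ PySem.Str.len t ∧ PySem.Str.len t ≤ 10)) (pvCleanList tokens) = List.filter pvOK (pvCleanList tokens) from rfl]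
      have hhead := hsort (pvCleanList tokens)
      rw [minFold_spec] at hhead
      by_cases h2 : (pvCleanList tokens).filter pvOK = []
      · rw [if_neg (by simp [h2])]
        rw [if_pos h2] at hhead
        have hne : PySem.List.max? (pvCleanList tokens) (fun t => PySem.Str.len t) ≠ none :=
          fun h => h1 ((PySem.List.max?_eq_none_iff _ _).mp h)
        obtain ⟨m, hm⟩ := Option.ne_none_iff_exists'.mp hne
        rw [max?_eq_foldl_maxStep] at hm
        rw [hm] at hhead
        rw [max?_eq_foldl_maxStep, hm]
        cases hr : PySem.List.sorted2 (pvCleanList tokens) pvK1 pvK2 with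
        | nil => rw [hr] at hhead; simp at hhead
        | cons a t => rw [hr] at hhead; simp at hhead; simpa using hhead.symm
      · rw [if_pos (by simp [h2])]
        rw [if_neg h2] at hhead
        have hne : PySem.List.max? ((pvCleanList tokens).filter pvOK) (fun t => PySem.Str.len t) ≠ none :=
          fun h => h2 ((PySem.List.max?_eq_none_iff _ _).mp h)
        obtain ⟨m, hm⟩ := Option.ne_none_iff_exists'.mp hne
        rw [max?_eq_foldl_maxStep] at hm
        rw [hm] at hhead
        rw [max?_eq_foldl_maxStep, hm]
        cases hr : PySem.List.sorted2 (pvCleanList tokens) pvK1 pvK2 with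
        | nil => rw [hr] at hhead; simp at hhead
        | cons a t => rw [hr] at hhead; simp at hhead; simpa using hhead.symm
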